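-- pv_equiv track=rewrite | github.com/jcstallard/Project_Penny_JEH | src/combined.py | simulate_ron_game
-- ===== SOURCE A (Python) =====
-- def score_ron(deck: list[str], player1_choice: list[str], player2_choice: list[str]) -> tuple[int, int]:
--     """
--     This function will score a single deck.
--     Players will win cards in groups of 3 when their chosen sequence appears at the current
--     position. Finally, the player with more cards at the end wins.
--
--     The function will return a tuple of (player1_score, player2_score).
--     """
--
--     # pull up some sort of raw data and partially processed data.
--
--
--     player1_score = 0
--     player2_score = 0
--
--     i = 0
--
--     while i <= len(deck) - 3:
--         grab_cards = deck[i:i+3] # grabs the next 3 cards of the deck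
--
--         if grab_cards == player1_choice:
--             player1_score += 3
--             i += 3
--         elif grab_cards == player2_choice:
--             player2_score += 3
--             i += 3
--         else:
--             i += 1
--
--     return player1_score, player2_score
--
-- def simulate_ron_game(decks: list[list[str]], player1_choice: list[str], player2_choice: list[str]) -> list[tuple[int, int]]:
--     """
--     Simulate the game across many decks.
--     It returns wins for player1, draws, wins for player2.
--     """
--
--     wins1 = 0
--     wins2 = 0
--     draws = 0
--
--     for deck in decks:
--         score1, score2 = score_ron(deck, player1_choice, player2_choice ) # here I am using the previous score_ron for only one deck of cards.
--
--         if score1 > score2: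
--             wins1 += 1
--         elif score2 > score1:
--             wins2 += 1
--         else:
--             draws += 1
--
--         # add Eric's logic
--
--     return wins1, draws, wins2
-- ===== SOURCE B (Python) =====
-- def simulate_ron_game(decks: list[list[str]], player1_choice: list[str], player2_choice: list[str]) -> tuple[int, int, int]:
--     wins1 = 0
--     draws = 0
--     wins2 = 0
--     for deck in decks:
--         s1 = 0
--         s2 = 0
--         buf = []
--         for card in deck:
--             buf.append(card)
--             if len(buf) == 3:
--                 if buf == player1_choice:
--                     s1 += 3
--                     buf = []
--                 elif buf == player2_choice:
--                     s2 += 3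
--                     buf = []
--                 else:
--                     buf.pop(0)
--         if s1 > s2:
--             wins1 += 1
--         elif s2 > s1:
--             wins2 += 1
--         else:
--             draws += 1
--     return wins1, draws, wins2
-- ===== Notes on version B (the rewrite author's own statement) =====
-- stated objective: alternative
-- what changed: Scoring each deck is done in one streaming pass over the cards with a small rolling buffer of at most 3 recent cards (append, compare when full, clear on match / drop oldest otherwise), instead of an index-driven while loop that re-slices deck[i:i+3] at every step.
import Mathlib
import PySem

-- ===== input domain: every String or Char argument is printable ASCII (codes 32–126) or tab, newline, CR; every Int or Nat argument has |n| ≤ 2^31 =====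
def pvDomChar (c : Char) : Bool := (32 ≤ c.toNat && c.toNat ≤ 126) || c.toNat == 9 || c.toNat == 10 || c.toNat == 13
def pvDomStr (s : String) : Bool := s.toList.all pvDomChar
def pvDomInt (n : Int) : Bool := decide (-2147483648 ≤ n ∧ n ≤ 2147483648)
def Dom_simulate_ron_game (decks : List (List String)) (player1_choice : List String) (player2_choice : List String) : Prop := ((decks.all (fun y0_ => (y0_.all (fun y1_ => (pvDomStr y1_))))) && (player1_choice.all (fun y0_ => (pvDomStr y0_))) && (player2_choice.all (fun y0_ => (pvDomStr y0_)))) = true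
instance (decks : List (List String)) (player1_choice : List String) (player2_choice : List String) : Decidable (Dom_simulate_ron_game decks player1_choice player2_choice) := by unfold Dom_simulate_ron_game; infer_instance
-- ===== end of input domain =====

-- B scores each deck in one streaming pass with a rolling ≤3-card buffer instead of A's index-and-reslice while loop; same outer win/draw tally; equal on all inputs.


-- ===== PORT A =====
-- while i <= len(deck) - 3: grab = deck[i:i+3]; compare; jump 3 on match, 1 otherwise
def score_ron_loop (deck : List String) (p1 p2 : List String) (s1 s2 : Int) (i : Nat) : Int × Int :=
  if (i : Int) ≤ (deck.length : Int) - 3 then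
    let grab := PySem.List.slice deck (some (i : Int)) (some ((i : Int) + 3))
    if grab = p1 then score_ron_loop deck p1 p2 (s1 + 3) s2 (i + 3)
    else if grab = p2 then score_ron_loop deck p1 p2 s1 (s2 + 3) (i + 3)
    else score_ron_loop deck p1 p2 s1 s2 (i + 1)
  else (s1, s2)
termination_by deck.length - i
decreasing_by all_goals omega

def score_ron (deck : List String) (player1_choice player2_choice : List String) : Int × Int :=
  score_ron_loop deck player1_choice player2_choice 0 0 0

def simulate_ron_game (decks : List (List String)) (player1_choice : List String) (player2_choice : List String) : Int × Int × Int :=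
  let t := decks.foldl (fun (acc : Int × Int × Int) deck =>
    let (score1, score2) := score_ron deck player1_choice player2_choice
    if score1 > score2 then (acc.1 + 1, acc.2.1, acc.2.2)
    else if score2 > score1 then (acc.1, acc.2.1, acc.2.2 + 1)
    else (acc.1, acc.2.1 + 1, acc.2.2)) (0, 0, 0)
  t

-- ===== PORT B =====
-- streaming scorer: buffer of recent cards; append, compare when it holds 3, clear on match, drop oldest otherwise
def stream_score (p1 p2 : List String) : List String → List String → Int → Int → Int × Int
  | [], _, s1, s2 => (s1, s2)
  | c :: rest, buf, s1, s2 =>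
    let buf' := buf ++ [c]
    if buf'.length = 3 then
      if buf' = p1 then stream_score p1 p2 rest [] (s1 + 3) s2
      else if buf' = p2 then stream_score p1 p2 rest [] s1 (s2 + 3)
      else stream_score p1 p2 rest buf'.tail s1 s2
    else stream_score p1 p2 rest buf' s1 s2

def simulate_ron_game_alt (decks : List (List String)) (player1_choice : List String) (player2_choice : List String) : Int × Int × Int :=
  decks.foldl (fun (acc : Int × Int × Int) deck =>
    let (s1, s2) := stream_score player1_choice player2_choice deck [] 0 0
    if s1 > s2 then (acc.1 + 1, acc.2.1, acc.2.2)
    else if s2 > s1 then (acc.1, acc.2.1, acc.2.2 + 1)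
    else (acc.1, acc.2.1 + 1, acc.2.2)) (0, 0, 0)

-- ===== PRECONDITION & SPEC =====
def Spec_simulate_ron_game (decks : List (List String)) (player1_choice : List String) (player2_choice : List String) (out : Int × Int × Int) : Prop := out = simulate_ron_game_alt decks player1_choice player2_choice
instance (decks : List (List String)) (player1_choice : List String) (player2_choice : List String) (out : Int × Int × Int) : Decidable (Spec_simulate_ron_game decks player1_choice player2_choice out) := by unfold Spec_simulate_ron_game; infer_instance

-- ===== CLAIM (what is proved, stated in full; the proofs are below) =====
def Claim_equal_simulate_ron_game : Prop := ∀ (decks : List (List String)) (player1_choice : List String) (player2_choice : List String), Dom_simulate_ron_game decks player1_choice player2_choice → Spec_simulate_ron_game decks player1_choice player2_choice (simulate_ron_game decks player1_choice player2_choice)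

-- ===== LEMMAS AND PROOFS =====

-- common reference scorer: slide/jump recursion on the remaining cards
def gscore (p1 p2 : List String) : List String → Int → Int → Int × Int
  | a :: b :: c :: rest, s1, s2 =>
    if [a, b, c] = p1 then gscore p1 p2 rest (s1 + 3) s2
    else if [a, b, c] = p2 then gscore p1 p2 rest s1 (s2 + 3)
    else gscore p1 p2 (b :: c :: rest) s1 s2
  | _, s1, s2 => (s1, s2)
termination_by l => l.length
decreasing_by all_goals (simp <;> omega)

theorem score_ron_loop_eq_gscore (p1 p2 : List String) (deck : List String) (i : Nat) (s1 s2 : Int) :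
    score_ron_loop deck p1 p2 s1 s2 i = gscore p1 p2 (deck.drop i) s1 s2 := by
  induction hn : deck.length - i using Nat.strong_induction_on generalizing i s1 s2 with
  | _ n ih =>
  rw [score_ron_loop]
  by_cases h : (i : Int) ≤ (deck.length : Int) - 3
  · have hlen : i + 3 ≤ deck.length := by omega
    have hlen3 : 3 ≤ (deck.drop i).length := by simp; omega
    cases hdi : deck.drop i with
    | nil => rw [hdi] at hlen3; simp at hlen3
    | cons a t =>
      cases t with
      | nil => rw [hdi] at hlen3; simp at hlen3
      | cons b t2 =>
        cases t2 with
        | nil => rw [hdi] at hlen3; simp at hlen3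
        | cons c rest2 =>
          have hgrab : PySem.List.slice deck (some (i : Int)) (some ((i : Int) + 3)) = [a, b, c] := by
            have hs := PySem.List.slice_natCast_add (xs := deck) (j := i) (n := 3)
            push_cast at hs
            rw [hs, hdi]; rfl
          have hd3 : deck.drop (i + 3) = rest2 := by
            have h3 : deck.drop (i + 3) = (deck.drop i).drop 3 := by rw [List.drop_drop]
            rw [h3, hdi]; rfl
          have hd1 : deck.drop (i + 1) = b :: c :: rest2 := by
            have h1' : deck.drop (i + 1) = (deck.drop i).drop 1 := by rw [List.drop_drop]
            rw [h1', hdi]; rfl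
          simp only [if_pos h, hgrab]
          rw [gscore]
          by_cases h1 : [a, b, c] = p1
          · simp only [if_pos h1]
            rw [ih (deck.length - (i + 3)) (by omega) (i + 3) _ _ rfl, hd3]
          · by_cases h2 : [a, b, c] = p2
            · simp only [if_neg h1, if_pos h2]
              rw [ih (deck.length - (i + 3)) (by omega) (i + 3) _ _ rfl, hd3]
            · simp only [if_neg h1, if_neg h2]
              rw [ih (deck.length - (i + 1)) (by omega) (i + 1) _ _ rfl, hd1]
  · have hlen : deck.length < i + 3 := by omega
    simp only [if_neg h]
    have hlt : (deck.drop i).length < 3 := by simp; omega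
    rw [gscore.eq_def]
    cases hdi : deck.drop i with
    | nil => rfl
    | cons a t =>
      cases t with
      | nil => rfl
      | cons b t2 =>
        cases t2 with
        | nil => rfl
        | cons c t3 => rw [hdi] at hlt; simp at hlt; omega

theorem stream_score_eq_gscore (p1 p2 : List String) (l : List String) : ∀ (buf : List String) (s1 s2 : Int),
    buf.length ≤ 2 →
    stream_score p1 p2 l buf s1 s2 = gscore p1 p2 (buf ++ l) s1 s2 := by
  induction l with
  | nil =>
    intro buf s1 s2 hb
    rw [stream_score, gscore.eq_def]
    simp only [List.append_nil]
    cases buf with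
    | nil => rfl
    | cons a t =>
      cases t with
      | nil => rfl
      | cons b t2 =>
        cases t2 with
        | nil => rfl
        | cons x t3 => simp at hb
  | cons c rest ih =>
    intro buf s1 s2 hb
    rw [stream_score]
    cases buf with
    | nil =>
      simp only [List.nil_append, List.length_cons,
        List.length, if_neg (by decide : ¬ ((1 : Nat) = 3))]
      exact ih [c] s1 s2 (by simp)
    | cons a t =>
      cases t with
      | nil =>
        simp only [List.cons_append, List.nil_append, List.length,
          if_neg (by decide : ¬ ((2 : Nat) = 3))]
        exact ih [a, c] s1 s2 (by simp)
      | cons b t2 =>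
        cases t2 with
        | nil =>
          simp only [List.cons_append, List.nil_append, List.length, if_true]
          rw [gscore]
          by_cases h1 : [a, b, c] = p1
          · simp only [if_pos h1]; exact ih [] _ _ (by decide)
          · by_cases h2 : [a, b, c] = p2
            · simp only [if_neg h1, if_pos h2]; exact ih [] _ _ (by decide)
            · simp only [if_neg h1, if_neg h2, List.tail]
              exact ih [b, c] s1 s2 (by simp)
        | cons x t3 => simp at hb

theorem per_deck_eq (p1 p2 deck : List String) :
    score_ron deck p1 p2 = stream_score p1 p2 deck [] 0 0 := by
  rw [score_ron, score_ron_loop_eq_gscore, stream_score_eq_gscore p1 p2 deck [] 0 0 (by decide)]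
  simp

theorem simulate_ron_game_spec : Claim_equal_simulate_ron_game := by
  intro decks p1 p2 _
  unfold Spec_simulate_ron_game simulate_ron_game simulate_ron_game_alt
  simp only [per_deck_eq]
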